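-- pv_equiv track=rewrite | github.com/Prashithshetty/SENTINAL | backend/scanner/poc_generator.py | _assess_overall_difficulty
-- ===== SOURCE A (Python) =====
-- from typing import Dict, List, Any, Optional
--
-- def _assess_overall_difficulty(vulnerabilities: List[Dict[str, Any]]) -> str:
--     """Assess overall exploitation difficulty."""
--     if not vulnerabilities:
--         return 'none'
--
--     difficulties = []
--     for vuln in vulnerabilities:
--         complexity = vuln.get('exploitation_complexity', 'medium')
--         difficulties.append(complexity)
--
--     # Return the most common difficulty
--     if 'high' in difficulties:
--         return 'high'
--     elif 'medium' in difficulties: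
--         return 'medium'
--     else:
--         return 'low'
-- ===== SOURCE B (Python) =====
-- def _assess_overall_difficulty(vulnerabilities):
--     """Assess overall exploitation difficulty."""
--     if not vulnerabilities:
--         return 'none'
--     rank = {'high': 2, 'medium': 1}
--     best = max(rank.get(v.get('exploitation_complexity', 'medium'), 0) for v in vulnerabilities)
--     return {2: 'high', 1: 'medium', 0: 'low'}[best]
-- ===== Notes on version B (the rewrite author's own statement) =====
-- stated objective: simpler
-- what changed: Replaces the intermediate difficulties list and the 'high'-then-'medium' membership ladder with a single max-reduction over an ordinal priority table, translated back to a string at the end.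
import Mathlib
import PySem

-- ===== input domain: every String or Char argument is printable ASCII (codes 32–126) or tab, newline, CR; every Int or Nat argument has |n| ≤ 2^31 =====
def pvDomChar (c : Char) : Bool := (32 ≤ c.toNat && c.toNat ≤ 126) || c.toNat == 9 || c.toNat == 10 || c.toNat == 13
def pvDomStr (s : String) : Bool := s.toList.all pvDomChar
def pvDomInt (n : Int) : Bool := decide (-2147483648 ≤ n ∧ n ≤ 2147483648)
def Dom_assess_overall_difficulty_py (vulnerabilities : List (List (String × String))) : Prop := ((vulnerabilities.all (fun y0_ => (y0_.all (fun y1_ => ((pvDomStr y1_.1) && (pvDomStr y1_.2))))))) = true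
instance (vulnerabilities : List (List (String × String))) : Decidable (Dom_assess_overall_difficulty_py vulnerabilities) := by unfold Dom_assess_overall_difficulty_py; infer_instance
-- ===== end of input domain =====

-- ===== PORT A =====
-- B replaces A's difficulties list + membership ladder by a max over an ordinal table (objective: simpler).
-- dict.get('exploitation_complexity', 'medium'): first-match lookup on the association list
def pvComplexityOf (v : List (String × String)) : String :=
  (List.lookup "exploitation_complexity" v).getD "medium"

def assess_overall_difficulty_py (vulnerabilities : List (List (String × String))) : String :=
  if vulnerabilities = [] then "none"
  else
    let difficulties := vulnerabilities.foldl (fun acc vuln => acc ++ [pvComplexityOf vuln]) []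
    if difficulties.contains "high" then "high"
    else if difficulties.contains "medium" then "medium"
    else "low"

-- ===== PORT B =====
-- rank.get(c, 0) on the literal table {'high': 2, 'medium': 1}
def pvRank (c : String) : Int :=
  (List.lookup c [("high", (2 : Int)), ("medium", 1)]).getD 0

-- {2: 'high', 1: 'medium', 0: 'low'}[best]; best is always one of 0,1,2, so the key is present
def pvUnrank (b : Int) : String :=
  (List.lookup b [((2 : Int), "high"), (1, "medium"), (0, "low")]).getD ""

def assess_overall_difficulty_py_alt (vulnerabilities : List (List (String × String))) : String :=
  if vulnerabilities = [] then "none"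
  else
    let best := (PySem.List.max? (vulnerabilities.map (fun v => pvRank (pvComplexityOf v))) (fun x => x)).getD 0
    pvUnrank best

-- ===== PRECONDITION & SPEC =====
def Spec_assess_overall_difficulty_py (vulnerabilities : List (List (String × String))) (out : String) : Prop := out = assess_overall_difficulty_py_alt vulnerabilities
instance (vulnerabilities : List (List (String × String))) (out : String) : Decidable (Spec_assess_overall_difficulty_py vulnerabilities out) := by unfold Spec_assess_overall_difficulty_py; infer_instance

-- ===== CLAIM (what is proved, stated in full; the proofs are below) =====
def Claim_equal_assess_overall_difficulty_py : Prop := ∀ (vulnerabilities : List (List (String × String))), Dom_assess_overall_difficulty_py vulnerabilities → Spec_assess_overall_difficulty_py vulnerabilities (assess_overall_difficulty_py vulnerabilities)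

-- ===== LEMMAS AND PROOFS =====

-- foldl-append accumulation is map
theorem pvFoldlAppendMap (l : List (List (String × String))) (init : List String) :
    l.foldl (fun acc vuln => acc ++ [pvComplexityOf vuln]) init = init ++ l.map pvComplexityOf := by
  induction l generalizing init with
  | nil => simp
  | cons h t ih => simp [List.foldl, ih]

theorem pvRank_cases (c : String) : pvRank c = 2 ∨ pvRank c = 1 ∨ pvRank c = 0 := by
  by_cases h2 : c = "high"
  · subst h2; left; decide
  · by_cases h1 : c = "medium"
    · subst h1; right; left; decide
    · have e2 : (c == "high") = false := by simp [h2]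
      have e1 : (c == "medium") = false := by simp [h1]
      right; right; simp [pvRank, List.lookup, e2, e1]

theorem pvRank_eq_two (c : String) : pvRank c = 2 ↔ c = "high" := by
  by_cases h2 : c = "high"
  · subst h2; simp; decide
  · by_cases h1 : c = "medium"
    · subst h1; simp [h2]; decide
    · have e2 : (c == "high") = false := by simp [h2]
      have e1 : (c == "medium") = false := by simp [h1]
      simp [pvRank, List.lookup, e2, e1, h2, h1]

theorem pvRank_eq_one (c : String) : pvRank c = 1 ↔ c = "medium" := by
  by_cases h2 : c = "high"
  · subst h2; simp; decide
  · by_cases h1 : c = "medium"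
    · subst h1; simp; decide
    · have e2 : (c == "high") = false := by simp [h2]
      have e1 : (c == "medium") = false := by simp [h1]
      simp [pvRank, List.lookup, e2, e1, h2, h1]

-- the ladder over the complexities equals unrank of the max rank, for nonempty lists
theorem pvLadder_eq (l : List String) (hne : l ≠ []) :
    (if l.contains "high" then "high" else if l.contains "medium" then "medium" else "low")
      = pvUnrank ((PySem.List.max? (l.map pvRank) (fun x => x)).getD 0) := by
  obtain ⟨m, hm⟩ : ∃ m, PySem.List.max? (l.map pvRank) (fun x => x) = some m := by
    rcases Option.eq_none_or_eq_some (PySem.List.max? (l.map pvRank) (fun x => x)) with h | h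
    · rw [PySem.List.max?_eq_none_iff] at h
      simp at h; exact absurd h hne
    · exact h
  have hmem : m ∈ l.map pvRank := PySem.List.max?_mem hm
  have hmax : ∀ y ∈ l.map pvRank, y ≤ m := PySem.List.max?_isMax hm
  rw [hm]; simp only [Option.getD_some]
  obtain ⟨c0, hc0l, hc0⟩ := List.mem_map.mp hmem
  by_cases hhigh : "high" ∈ l
  · have h2m : (2 : Int) ≤ m := hmax 2 (List.mem_map.mpr ⟨"high", hhigh, by decide⟩)
    have hm2 : m = 2 := by rcases pvRank_cases c0 with h | h | h <;> omega
    rw [hm2]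
    have hu : pvUnrank 2 = "high" := by decide
    rw [hu]; simp [hhigh]
  · have hne2 : m ≠ 2 := by
      intro h
      rw [h, pvRank_eq_two] at hc0
      exact hhigh (hc0 ▸ hc0l)
    by_cases hmed : "medium" ∈ l
    · have h1m : (1 : Int) ≤ m := hmax 1 (List.mem_map.mpr ⟨"medium", hmed, by decide⟩)
      have hm1 : m = 1 := by rcases pvRank_cases c0 with h | h | h <;> omega
      rw [hm1]
      have hu : pvUnrank 1 = "medium" := by decide
      rw [hu]; simp [hhigh, hmed]
    · have hne1 : m ≠ 1 := by
        intro h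
        rw [h, pvRank_eq_one] at hc0
        exact hmed (hc0 ▸ hc0l)
      have hm0 : m = 0 := by rcases pvRank_cases c0 with h | h | h <;> omega
      rw [hm0]
      have hu : pvUnrank 0 = "low" := by decide
      rw [hu]; simp [hhigh, hmed]

-- ===== VERDICT =====
theorem assess_overall_difficulty_py_spec : Claim_equal_assess_overall_difficulty_py := by
  intro vs _
  unfold Spec_assess_overall_difficulty_py assess_overall_difficulty_py assess_overall_difficulty_py_alt
  by_cases h : vs = []
  · simp [h]
  · simp only [if_neg h]
    rw [pvFoldlAppendMap, List.nil_append]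
    rw [pvLadder_eq (vs.map pvComplexityOf) (by simpa using h)]
    simp [List.map_map, Function.comp_def]
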